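-- pv_equiv track=rewrite | github.com/isaacruiiizz/ProjecteIABDPau-Isaac | organitzar_dataset_yolo.py | extreure_nom_frame
-- ===== SOURCE A (Python) =====
-- def extreure_nom_frame(label_filename):
--     """
--     Extreu el nom real del frame d'un fitxer d'etiqueta de Label Studio
--
--     Els fitxers d'etiqueta tenen el format: UUID-frame_XXXXXX.txt
--     Aquesta funció extreu: frame_XXXXXX
--
--     Args:
--         label_filename: Nom del fitxer d'etiqueta (ex: "35ebf3a4-frame_000001.txt")
--
--     Returns:
--         str: Nom del frame (ex: "frame_000001")
--     """
--     # Eliminar extensió .txt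
--     name_without_ext = label_filename.replace('.txt', '')
--
--     # Buscar "frame_" al nom
--     if 'frame_' in name_without_ext:
--         # Extreure tot després de l'últim guió abans de "frame_"
--         parts = name_without_ext.split('-')
--         for i, part in enumerate(parts):
--             if part.startswith('frame_'):
--                 # Agafar aquesta part i les següents (per si hi ha més guions)
--                 return '-'.join(parts[i:])
--
--     # Si no trobem el patró, retornar el nom complet sense extensió
--     return name_without_ext
-- ===== SOURCE B (Python) =====
-- def extreure_nom_frame(label_filename):
--     """Same extraction via two substring searches: if the name itself starts
--     with 'frame_' return it, otherwise locate the first occurrence of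
--     '-frame_' and return everything after that dash; no split/join."""
--     name = label_filename.replace('.txt', '')
--     if name.startswith('frame_'):
--         return name
--     i = name.find('-frame_')
--     if i == -1:
--         return name
--     return name[i+1:]
-- ===== Notes on version B (the rewrite author's own statement) =====
-- stated objective: idiomatic
-- what changed: Replaced A's membership test + split('-') + enumerate loop + '-'.join rebuild by two direct substring searches: startswith('frame_') for a match at position 0, else find('-frame_') and slice off everything after that first dash; the parts list is never materialised.
import Mathlib
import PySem

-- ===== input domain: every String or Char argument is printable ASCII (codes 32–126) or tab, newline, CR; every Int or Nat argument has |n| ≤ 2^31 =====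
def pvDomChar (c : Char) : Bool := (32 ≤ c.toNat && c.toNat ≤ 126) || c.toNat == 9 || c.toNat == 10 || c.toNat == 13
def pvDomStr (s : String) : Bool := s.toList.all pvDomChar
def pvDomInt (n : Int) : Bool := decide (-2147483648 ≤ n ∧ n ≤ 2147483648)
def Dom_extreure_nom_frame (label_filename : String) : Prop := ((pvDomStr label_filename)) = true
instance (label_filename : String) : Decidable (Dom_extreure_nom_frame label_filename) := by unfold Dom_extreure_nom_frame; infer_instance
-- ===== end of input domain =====

-- B replaces A's split('-')/enumerate/'-'.join pipeline with two direct substring searches (startswith 'frame_', else find '-frame_' and slice): alternative decomposition, same result.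

-- ===== PORT A =====
-- the 'for i, part in enumerate(parts): if part.startswith("frame_"): return "-".join(parts[i:])' loop
def pvAJoinLoop (parts : List (List Char)) : Option (List Char) :=
  match parts with
  | [] => none
  | p :: rest =>
    if PySem.Chars.startswith p "frame_".toList then
      some (PySem.Chars.join ['-'] (p :: rest))
    else pvAJoinLoop rest

def extreure_nom_frame (label_filename : String) : String :=
  let name := PySem.Chars.replace label_filename.toList ".txt".toList []
  if PySem.Chars.isIn "frame_".toList name then
    match pvAJoinLoop (PySem.Chars.splitOn name ['-']) with
    | some r => String.ofList r
    | none => String.ofList name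
  else String.ofList name

-- ===== PORT B =====
def extreure_nom_frame_alt (label_filename : String) : String :=
  let name := PySem.Chars.replace label_filename.toList ".txt".toList []
  if PySem.Chars.startswith name "frame_".toList then String.ofList name
  else
    let i := PySem.Chars.find name "-frame_".toList
    if i = -1 then String.ofList name
    else String.ofList (PySem.List.slice name (some (i + 1)) none)

-- ===== PRECONDITION & SPEC =====
def Spec_extreure_nom_frame (label_filename : String) (out : String) : Prop := out = extreure_nom_frame_alt label_filename
instance (label_filename : String) (out : String) : Decidable (Spec_extreure_nom_frame label_filename out) := by unfold Spec_extreure_nom_frame; infer_instance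

-- ===== CLAIM (what is proved, stated in full; the proofs are below) =====
def Claim_equal_extreure_nom_frame : Prop := ∀ (label_filename : String), Dom_extreure_nom_frame label_filename → Spec_extreure_nom_frame label_filename (extreure_nom_frame label_filename)

-- ===== LEMMAS AND PROOFS =====

-- proof-only intermediary: a boundary-tracking scan that both ports are related to
def pvBScan (boundary : Bool) (cs : List Char) : Option (List Char) :=
  match cs with
  | [] => none
  | c :: rest =>
    if boundary && PySem.Chars.startswith (c :: rest) "frame_".toList then some (c :: rest)
    else pvBScan (c == '-') rest

-- structural reformulation of splitOn on separator ['-']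
def pvConsHead (pre : List Char) : List (List Char) → List (List Char)
  | [] => [pre]
  | h :: t => (pre ++ h) :: t

def pvMySplit : List Char → List (List Char)
  | [] => [[]]
  | c :: rest => if c = '-' then [] :: pvMySplit rest else pvConsHead [c] (pvMySplit rest)

theorem pvMySplit_ne_nil (cs : List Char) : pvMySplit cs ≠ [] := by
  cases cs with
  | nil => simp [pvMySplit]
  | cons c rest =>
    simp only [pvMySplit]
    split
    · simp
    · cases pvMySplit rest with
      | nil => simp [pvConsHead]
      | cons h t => simp [pvConsHead]

theorem pvSplitGo_eq : ∀ (f : Nat) (l cur : List Char) (acc : List (List Char)),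
    l.length < f →
    PySem.Chars.splitOn.go ['-'] f l cur acc = acc.reverse ++ pvConsHead cur.reverse (pvMySplit l) := by
  intro f
  induction f with
  | zero => intro l cur acc h; omega
  | succ f ih =>
    intro l cur acc h
    cases l with
    | nil =>
      simp [PySem.Chars.splitOn.go, pvMySplit, pvConsHead]
    | cons c rest =>
      simp only [PySem.Chars.splitOn.go]
      by_cases hc : c = '-'
      · subst hc
        rw [if_pos (by simp [List.isPrefixOf])]
        have hdrop : ∀ (r : List Char), List.drop (List.length (['-'] : List Char)) ('-' :: r) = r := fun r => rfl
        rw [hdrop]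
        rw [ih rest [] (cur.reverse :: acc) (by simp at h; omega)]
        rw [show pvMySplit ('-' :: rest) = [] :: pvMySplit rest from by simp [pvMySplit]]
        cases hms : pvMySplit rest with
        | nil => exact absurd hms (pvMySplit_ne_nil rest)
        | cons h t => simp [pvConsHead]
      · have : (['-'].isPrefixOf (c :: rest)) = false := by
          simp [List.isPrefixOf]; exact fun hh => (hc hh.symm).elim
        rw [if_neg (by simp [this])]
        rw [ih rest (c :: cur) acc (by simp at h; omega)]
        rw [show pvMySplit (c :: rest) = pvConsHead [c] (pvMySplit rest) from by simp [pvMySplit, hc]]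
        cases pvMySplit rest with
        | nil => simp [pvConsHead]
        | cons h t => simp [pvConsHead]

theorem pvSplitOn_eq (cs : List Char) : PySem.Chars.splitOn cs ['-'] = pvMySplit cs := by
  rw [PySem.Chars.splitOn]
  rw [pvSplitGo_eq (cs.length + 1) cs [] [] (by omega)]
  cases hms : pvMySplit cs with
  | nil => exact absurd hms (pvMySplit_ne_nil cs)
  | cons h t => simp [pvConsHead]

theorem pvJoin_consHead (pre : List Char) (ms : List (List Char)) :
    PySem.Chars.join ['-'] (pvConsHead pre ms) = pre ++ PySem.Chars.join ['-'] ms := by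
  cases ms with
  | nil => simp [pvConsHead, PySem.Chars.join_singleton, PySem.Chars.join_nil]
  | cons h t =>
    cases t with
    | nil => simp [pvConsHead, PySem.Chars.join_singleton]
    | cons h2 t2 =>
      simp [pvConsHead, PySem.Chars.join_cons_cons]

theorem pvJoin_mySplit (cs : List Char) : PySem.Chars.join ['-'] (pvMySplit cs) = cs := by
  induction cs with
  | nil => simp [pvMySplit, PySem.Chars.join_singleton]
  | cons c rest ih =>
    by_cases hc : c = '-'
    · subst hc
      rw [show pvMySplit ('-' :: rest) = [] :: pvMySplit rest from by simp [pvMySplit]]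
      cases hms : pvMySplit rest with
      | nil => exact absurd hms (pvMySplit_ne_nil rest)
      | cons h t =>
        rw [PySem.Chars.join_cons_cons]
        rw [hms] at ih
        simp [ih]
    · rw [show pvMySplit (c :: rest) = pvConsHead [c] (pvMySplit rest) from by simp [pvMySplit, hc]]
      rw [pvJoin_consHead]
      simp [ih]

theorem pvMySplit_dash_free (cs : List Char) : ∀ p ∈ pvMySplit cs, '-' ∉ p := by
  induction cs with
  | nil => simp [pvMySplit]
  | cons c rest ih =>
    by_cases hc : c = '-'
    · subst hc
      rw [show pvMySplit ('-' :: rest) = [] :: pvMySplit rest from by simp [pvMySplit]]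
      intro p hp
      rcases List.mem_cons.mp hp with hp1 | hp1
      · subst hp1; simp
      · exact ih p hp1
    · rw [show pvMySplit (c :: rest) = pvConsHead [c] (pvMySplit rest) from by simp [pvMySplit, hc]]
      cases hms : pvMySplit rest with
      | nil =>
        simp [pvConsHead]
        exact fun h => hc h.symm
      | cons h t =>
        intro p hp
        simp only [pvConsHead] at hp
        rcases List.mem_cons.mp hp with hp2 | hp2
        · subst hp2
          intro hm
          rcases List.mem_append.mp hm with hm2 | hm2
          · simp at hm2; exact hc hm2.symm
          · exact ih h (by rw [hms]; simp) hm2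
        · exact ih p (by rw [hms]; exact List.mem_cons_of_mem _ hp2)

-- '-' does not occur in "frame_": a prefix match across the separator implies a match on the part
theorem pvPrefix_sep (u : List Char) (hu : '-' ∉ u) :
    ∀ (p t : List Char), ¬ u <+: p → u <+: (p ++ '-' :: t) → False := by
  induction u with
  | nil => intro p t hnp _; exact hnp (List.nil_prefix)
  | cons b u' ihu =>
    intro p t hnp hpre
    cases p with
    | nil =>
      rcases hpre with ⟨s, hs⟩
      simp at hs
      obtain ⟨hb, -⟩ := hs
      exact hu (by simp [hb])
    | cons a p' =>
      rcases hpre with ⟨s, hs⟩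
      simp at hs
      obtain ⟨hab, hs'⟩ := hs
      subst hab
      refine ihu (by intro h; exact hu (List.mem_cons_of_mem _ h)) p' t ?_ ⟨s, hs'⟩
      intro hup
      exact hnp (by exact List.cons_prefix_cons.mpr ⟨rfl, hup⟩)

theorem pvBScan_false_free (p : List Char) (hp : '-' ∉ p) : pvBScan false p = none := by
  induction p with
  | nil => rfl
  | cons c rest ih =>
    simp only [pvBScan, Bool.false_and, if_neg Bool.false_ne_true]
    have hc : (c == '-') = false := by
      simp; intro h; exact hp (by simp [h])
    rw [hc]
    exact ih (fun h => hp (List.mem_cons_of_mem _ h))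

theorem pvBScan_false_sep (p t : List Char) (hp : '-' ∉ p) :
    pvBScan false (p ++ '-' :: t) = pvBScan true t := by
  induction p with
  | nil => simp [pvBScan]
  | cons c rest ih =>
    simp only [List.cons_append, pvBScan, Bool.false_and, if_neg Bool.false_ne_true]
    have hc : (c == '-') = false := by
      simp; intro h; exact hp (by simp [h])
    rw [hc]
    exact ih (fun h => hp (List.mem_cons_of_mem _ h))

theorem pvBScan_some_infix (b : Bool) (cs r : List Char) (h : pvBScan b cs = some r) :
    "frame_".toList <:+: cs := by
  induction cs generalizing b with
  | nil => simp [pvBScan] at h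
  | cons c rest ih =>
    simp only [pvBScan] at h
    split at h
    · rename_i hcond
      rw [Bool.and_eq_true] at hcond
      exact ((PySem.Chars.startswith_iff _ _).mp hcond.2).isInfix
    · exact List.infix_cons (ih _ h)

theorem pvFire (cs : List Char) (h : "frame_".toList <+: cs) : pvBScan true cs = some cs := by
  cases cs with
  | nil => exact absurd (List.prefix_nil.mp h) (by decide)
  | cons c rest =>
    simp only [pvBScan]
    rw [if_pos (by rw [Bool.true_and, PySem.Chars.startswith_iff]; exact h)]

theorem pvMain : ∀ (ps : List (List Char)), ps ≠ [] → (∀ p ∈ ps, '-' ∉ p) →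
    pvBScan true (PySem.Chars.join ['-'] ps) = pvAJoinLoop ps := by
  intro ps
  induction ps with
  | nil => intro h; exact absurd rfl h
  | cons p rest ih =>
    intro _ hfree
    have hpf : '-' ∉ p := hfree p (by simp)
    by_cases hs : PySem.Chars.startswith p "frame_".toList = true
    · have hpre : "frame_".toList <+: PySem.Chars.join ['-'] (p :: rest) := by
        refine ((PySem.Chars.startswith_iff _ _).mp hs).trans ?_
        cases rest with
        | nil => rw [PySem.Chars.join_singleton]
        | cons q rest' =>
          rw [PySem.Chars.join_cons_cons]
          simp [List.append_assoc]
      rw [pvFire _ hpre]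
      simp only [pvAJoinLoop, if_pos hs]
    · have hnp : ¬ "frame_".toList <+: p := fun h => hs ((PySem.Chars.startswith_iff _ _).mpr h)
      simp only [pvAJoinLoop, if_neg hs]
      cases rest with
      | nil =>
        rw [PySem.Chars.join_singleton]
        cases hp : p with
        | nil => rfl
        | cons a p' =>
          subst hp
          simp only [pvBScan]
          rw [if_neg (by rw [Bool.true_and, PySem.Chars.startswith_iff]; exact hnp)]
          have ha : (a == '-') = false := by
            simp only [beq_eq_false_iff_ne, ne_eq]
            exact fun h => hpf (by simp [h])
          rw [ha]
          exact pvBScan_false_free p' (fun h => hpf (List.mem_cons_of_mem _ h))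
      | cons q rest' =>
        rw [PySem.Chars.join_cons_cons]
        rw [show p ++ ['-'] ++ PySem.Chars.join ['-'] (q :: rest')
              = p ++ '-' :: PySem.Chars.join ['-'] (q :: rest') from by simp]
        have hnw : ¬ "frame_".toList <+: (p ++ '-' :: PySem.Chars.join ['-'] (q :: rest')) :=
          fun h => pvPrefix_sep "frame_".toList (by decide) p _ hnp h
        have ihr := ih (by simp) (fun x hx => hfree x (List.mem_cons_of_mem _ hx))
        cases hp : p with
        | nil =>
          subst hp
          rw [List.nil_append]
          simp only [pvBScan]
          rw [if_neg (by
            rw [Bool.true_and, PySem.Chars.startswith_iff]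
            exact fun h => hnw (by simpa using h))]
          exact ihr
        | cons a p' =>
          subst hp
          rw [List.cons_append]
          simp only [pvBScan]
          rw [if_neg (by
            rw [Bool.true_and, PySem.Chars.startswith_iff]
            simpa using hnw)]
          have ha : (a == '-') = false := by
            simp only [beq_eq_false_iff_ne, ne_eq]
            exact fun h => hpf (by simp [h])
          rw [ha]
          rw [pvBScan_false_sep p' _ (fun h => hpf (List.mem_cons_of_mem _ h))]
          exact ihr

-- A's core equals the scan
theorem pvCoreA (name : List Char) :
    (if PySem.Chars.isIn "frame_".toList name then
      match pvAJoinLoop (PySem.Chars.splitOn name ['-']) with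
      | some r => String.ofList r
      | none => String.ofList name
    else String.ofList name) =
    (match pvBScan true name with
      | some r => String.ofList r
      | none => String.ofList name) := by
  by_cases hin : PySem.Chars.isIn "frame_".toList name = true
  · rw [if_pos hin, pvSplitOn_eq]
    have hM := pvMain (pvMySplit name) (pvMySplit_ne_nil name) (pvMySplit_dash_free name)
    rw [pvJoin_mySplit] at hM
    rw [hM]
  · rw [if_neg hin]
    have hB : pvBScan true name = none := by
      cases h : pvBScan true name with
      | none => rfl
      | some r =>
        exact absurd ((PySem.Chars.isIn_iff_infix _ _).mpr (pvBScan_some_infix _ _ _ h)) hin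
    rw [hB]

-- a scan that fires produces either a whole-string match or one right after a dash
theorem pvBScan_some_loc (b : Bool) (cs r : List Char) (h : pvBScan b cs = some r) :
    (b = true ∧ "frame_".toList <+: cs) ∨ "-frame_".toList <:+: cs := by
  induction cs generalizing b with
  | nil => simp [pvBScan] at h
  | cons c rest ih =>
    simp only [pvBScan] at h
    split at h
    · rename_i hcond
      rw [Bool.and_eq_true] at hcond
      exact Or.inl ⟨hcond.1, (PySem.Chars.startswith_iff _ _).mp hcond.2⟩
    · rcases ih _ h with ⟨hb, hpre⟩ | hinf
      · have hc : c = '-' := by simpa using hb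
        subst hc
        refine Or.inr ?_
        rw [show ("-frame_".toList) = '-' :: "frame_".toList from by decide]
        exact (List.cons_prefix_cons.mpr ⟨rfl, hpre⟩).isInfix
      · exact Or.inr (List.infix_cons hinf)

-- the scan fires exactly after the FIRST '-frame_' occurrence (when no match at position 0)
theorem pvBScan_at_first : ∀ (cs : List Char) (b : Bool) (k : Nat),
    (b = true → ¬ "frame_".toList <+: cs) →
    (∀ m, m < k → ¬ "-frame_".toList <+: cs.drop m) →
    "-frame_".toList <+: cs.drop k →
    pvBScan b cs = some (cs.drop (k + 1)) := by
  intro cs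
  induction cs with
  | nil =>
    intro b k _ _ hk
    rw [List.drop_nil] at hk
    exact absurd (List.prefix_nil.mp hk) (by decide)
  | cons c rest ih =>
    intro b k hb hmin hk
    have hstep : pvBScan b (c :: rest) = pvBScan (c == '-') rest := by
      simp only [pvBScan]
      rw [if_neg]
      intro hcond
      rw [Bool.and_eq_true] at hcond
      exact hb hcond.1 ((PySem.Chars.startswith_iff _ _).mp hcond.2)
    rw [hstep]
    cases k with
    | zero =>
      rw [List.drop_zero,
        show ("-frame_".toList) = '-' :: "frame_".toList from by decide] at hk
      rcases List.cons_prefix_cons.mp hk with ⟨hc, hrest⟩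
      rw [List.drop_succ_cons, List.drop_zero]
      rw [show (c == '-') = true from by simp [← hc]]
      exact pvFire rest hrest
    | succ k' =>
      rw [List.drop_succ_cons] at hk
      rw [List.drop_succ_cons]
      refine ih (c == '-') k' ?_ ?_ hk
      · intro hcd hfr
        have hc : c = '-' := by simpa using hcd
        exact hmin 0 (by omega) (by
          rw [List.drop_zero, hc,
            show ("-frame_".toList) = '-' :: "frame_".toList from by decide]
          exact List.cons_prefix_cons.mpr ⟨rfl, hfr⟩)
      · intro m hm
        have := hmin (m + 1) (by omega)
        rwa [List.drop_succ_cons] at this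

-- the scan equals B's startswith/find core
theorem pvCoreB (name : List Char) :
    (match pvBScan true name with
      | some r => String.ofList r
      | none => String.ofList name) =
    (if PySem.Chars.startswith name "frame_".toList then String.ofList name
     else
       let i := PySem.Chars.find name "-frame_".toList
       if i = -1 then String.ofList name
       else String.ofList (PySem.List.slice name (some (i + 1)) none)) := by
  by_cases hs : PySem.Chars.startswith name "frame_".toList = true
  · rw [if_pos hs, pvFire name ((PySem.Chars.startswith_iff _ _).mp hs)]
  · rw [if_neg hs]
    have hnp : ¬ "frame_".toList <+: name :=
      fun h => hs ((PySem.Chars.startswith_iff _ _).mpr h)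
    simp only
    by_cases hf : PySem.Chars.find name "-frame_".toList = -1
    · rw [if_pos hf]
      have hni : ¬ "-frame_".toList <:+: name := (PySem.Chars.find_eq_neg_one_iff _ _).mp hf
      have hnone : pvBScan true name = none := by
        cases h : pvBScan true name with
        | none => rfl
        | some r =>
          rcases pvBScan_some_loc true name r h with ⟨_, hpre⟩ | hinf
          · exact absurd hpre hnp
          · exact absurd hinf hni
      rw [hnone]
    · rw [if_neg hf]
      have hge := PySem.Chars.neg_one_le_find (s := name) (sub := "-frame_".toList)
      have hpos : 0 ≤ PySem.Chars.find name "-frame_".toList := by omega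
      obtain ⟨hpre, hmin⟩ := PySem.Chars.find_spec (s := name) (sub := "-frame_".toList) hpos
      set k := (PySem.Chars.find name "-frame_".toList).toNat with hkdef
      have hcast : PySem.Chars.find name "-frame_".toList + 1 = ((k + 1 : Nat) : Int) := by
        omega
      rw [hcast, PySem.List.slice_from_natCast]
      rw [pvBScan_at_first name true k (fun _ => hnp) (fun m hm => hmin m hm) hpre]

-- ===== VERDICT (by name: the statement is the Claim_ definition above) =====
theorem extreure_nom_frame_spec : Claim_equal_extreure_nom_frame := by
  intro s _
  show extreure_nom_frame s = extreure_nom_frame_alt s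
  unfold extreure_nom_frame extreure_nom_frame_alt
  exact (pvCoreA (PySem.Chars.replace s.toList ".txt".toList [])).trans
    (pvCoreB (PySem.Chars.replace s.toList ".txt".toList []))
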